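-- pv_equiv track=rewrite | github.com/MomentEmu/MomentEmu | MomentEmu.py | generate_multi_indices
-- ===== SOURCE A (Python) =====
-- from itertools import combinations_with_replacement
-- from collections import Counter
--
-- def generate_multi_indices(n, d):
--     """Generate all multi-indices α in ℕ^n with total degree ≤ d."""
--     indices = []
--     for deg in range(d + 1):
--         for c in combinations_with_replacement(range(n), deg):
--             counter = Counter(c)
--             alpha = [counter[i] for i in range(n)]
--             indices.append(tuple(alpha))
--     return indices
-- ===== SOURCE B (Python) =====
-- def generate_multi_indices(n, d):
--     """Generate all multi-indices alpha in N^n with total degree <= d."""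
--     indices = []
--
--     def rec(i, r, partial):
--         # i positions still to fill, r budget remaining
--         if i <= 0:
--             if r == 0:
--                 indices.append(tuple(partial))
--             return
--         for k in reversed(range(r + 1)):
--             rec(i - 1, r - k, partial + [k])
--
--     for deg in range(d + 1):
--         rec(n, deg, [])
--     return indices
-- ===== Notes on version B (the rewrite author's own statement) =====
-- stated objective: alternative
-- what changed: Replaces itertools.combinations_with_replacement plus a Counter pass per combination by a direct recursion over the n coordinates that assigns each coordinate a budget share in descending order, emitting every count vector exactly once in the same order.
import Mathlib
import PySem

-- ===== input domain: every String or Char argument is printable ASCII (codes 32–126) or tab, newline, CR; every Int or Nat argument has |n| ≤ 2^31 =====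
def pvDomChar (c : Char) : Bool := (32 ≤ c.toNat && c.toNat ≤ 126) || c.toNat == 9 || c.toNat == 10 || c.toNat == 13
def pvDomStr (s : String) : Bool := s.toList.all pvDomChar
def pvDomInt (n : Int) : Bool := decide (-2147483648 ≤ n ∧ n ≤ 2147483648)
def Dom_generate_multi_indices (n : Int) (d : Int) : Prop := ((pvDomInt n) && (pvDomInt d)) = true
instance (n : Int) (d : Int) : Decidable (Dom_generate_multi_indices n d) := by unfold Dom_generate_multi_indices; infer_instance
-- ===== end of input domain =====

-- B replaces itertools.combinations_with_replacement + Counter by a direct recursion over the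
-- coordinates that emits each count vector once, in the same order (objective: alternative).

-- ===== PORT A =====
-- itertools.combinations_with_replacement(pool, r) in lexicographic order, as in CPython's docs:
-- combos of length r+1 from pool x::xs = (x prepended to each combo of length r from x::xs) ++ combos of length r+1 from xs.
def cwrStep (prev : List Int → List (List Int)) : List Int → List (List Int)
  | [] => []
  | x :: xs => ((prev (x :: xs)).map (fun c => x :: c)) ++ cwrStep prev xs

def cwr : Nat → List Int → List (List Int)
  | 0, _ => [[]]
  | r + 1, pool => cwrStep (cwr r) pool

-- Counter(c)[i] is c.count i; alpha = [counter[i] for i in range(n)].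
def generate_multi_indices (n : Int) (d : Int) : List (List Int) :=
  (PySem.List.pyRange 0 (d + 1) 1).foldl
    (fun indices deg =>
      indices ++ (cwr deg.toNat (PySem.List.pyRange 0 n 1)).map
        (fun c => (PySem.List.pyRange 0 n 1).map (fun i => (c.count i : Int))))
    []

-- ===== PORT B =====
-- rec(i, r, partial): i positions left, budget r; Python's `if i <= 0` base is n.toNat here.
def gmiRec : Nat → Nat → List Int → List (List Int)
  | 0, r, p => if r = 0 then [p] else []
  | i + 1, r, p =>
      ((List.range (r + 1)).reverse).flatMap (fun k => gmiRec i (r - k) (p ++ [(k : Int)]))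

def generate_multi_indices_alt (n : Int) (d : Int) : List (List Int) :=
  (PySem.List.pyRange 0 (d + 1) 1).foldl
    (fun indices deg => indices ++ gmiRec n.toNat deg.toNat []) []

-- ===== PRECONDITION & SPEC =====
def Spec_generate_multi_indices (n : Int) (d : Int) (out : List (List Int)) : Prop := out = generate_multi_indices_alt n d
instance (n : Int) (d : Int) (out : List (List Int)) : Decidable (Spec_generate_multi_indices n d out) := by unfold Spec_generate_multi_indices; infer_instance

-- ===== CLAIM (what is proved, stated in full; the proofs are below) =====
def Claim_equal_generate_multi_indices : Prop := ∀ (n : Int) (d : Int), Dom_generate_multi_indices n d → Spec_generate_multi_indices n d (generate_multi_indices n d)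

-- ===== LEMMAS AND PROOFS =====

-- the pool range(a), shifted: [a, a+1, …, a+m-1]
def rng (a : Int) (m : Nat) : List Int := (List.range m).map (fun j => a + Int.ofNat j)

lemma rng_succ (a : Int) (m : Nat) : rng a (m + 1) = a :: rng (a + 1) m := by
  simp only [rng, List.range_succ_eq_map, List.map_cons, List.map_map]
  rw [show a + Int.ofNat 0 = a by simp]
  congr 1
  apply List.map_congr_left
  intro j _
  simp only [Function.comp, Int.ofNat_eq_natCast, Nat.cast_succ]
  ring

lemma mem_of_mem_cwr : ∀ (r : Nat) (pool c : List Int), c ∈ cwr r pool → ∀ x ∈ c, x ∈ pool := by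
  intro r
  induction r with
  | zero =>
    intro pool c hc x hx
    simp [cwr] at hc
    subst hc
    simp at hx
  | succ r ih =>
    intro pool
    induction pool with
    | nil => intro c hc; simp [cwr, cwrStep] at hc
    | cons y ys ihp =>
      intro c hc x hx
      rw [show cwr (r + 1) (y :: ys) =
            ((cwr r (y :: ys)).map (fun c => y :: c)) ++ cwr (r + 1) ys from rfl,
          List.mem_append] at hc
      rcases hc with hc | hc
      · rw [List.mem_map] at hc
        obtain ⟨c', hc', rfl⟩ := hc
        rcases List.mem_cons.mp hx with rfl | hx'
        · exact List.mem_cons_self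
        · exact ih (y :: ys) c' hc' x hx' 
      · exact List.mem_cons_of_mem y (ihp c hc x hx)

lemma gmiRec_prefix : ∀ (m r : Nat) (p : List Int), gmiRec m r p = (gmiRec m r []).map (p ++ ·) := by
  intro m
  induction m with
  | zero => intro r p; by_cases h : r = 0 <;> simp [gmiRec, h]
  | succ m ih =>
    intro r p
    simp only [gmiRec, List.map_flatMap]
    suffices h : (fun k => gmiRec m (r - k) (p ++ [(k : Int)]))
        = (fun k => (gmiRec m (r - k) ([] ++ [(k : Int)])).map (p ++ ·)) by rw [h]
    funext k
    rw [ih, ih (r - k) ([] ++ [(k : Int)])]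
    simp [List.map_map, Function.comp, List.append_assoc]

def incHead : List Int → List Int
  | [] => []
  | x :: t => (x + 1) :: t

lemma gmiRec_zero : ∀ (m : Nat), gmiRec m 0 [] = [List.replicate m (0 : Int)] := by
  intro m
  induction m with
  | zero => simp [gmiRec]
  | succ m ih =>
    show ((List.range 1).reverse).flatMap
        (fun k => gmiRec m (0 - k) ([] ++ [(k : Int)])) = _
    rw [show (List.range 1).reverse = [0] from rfl]
    simp only [List.flatMap_cons, List.flatMap_nil, List.append_nil, Nat.zero_sub,
      List.nil_append]
    rw [gmiRec_prefix, ih]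
    simp [List.replicate_succ]

lemma gmiRec_succ_succ (m r : Nat) :
    (gmiRec (m + 1) r []).map incHead ++ (gmiRec m (r + 1) []).map (fun t => (0 : Int) :: t)
      = gmiRec (m + 1) (r + 1) [] := by
  show _ = ((List.range (r + 1 + 1)).reverse).flatMap (fun k => gmiRec m (r + 1 - k) ([] ++ [(k : Int)]))
  rw [List.range_succ_eq_map, List.reverse_cons, ← List.map_reverse, List.flatMap_append,
    List.flatMap_map, List.flatMap_singleton]
  congr 1
  · show ((List.range (r + 1)).reverse.flatMap (fun k => gmiRec m (r - k) ([] ++ [(k : Int)]))).map incHead = _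
    rw [List.map_flatMap]
    suffices h : (fun k => (gmiRec m (r - k) ([] ++ [(k : Int)])).map incHead)
        = (fun k => gmiRec m (r + 1 - Nat.succ k) ([] ++ [((Nat.succ k : Nat) : Int)])) by rw [h]
    funext k
    rw [Nat.succ_sub_succ, gmiRec_prefix m (r - k) ([] ++ [(k : Int)]),
      gmiRec_prefix m (r - k) ([] ++ [((Nat.succ k : Nat) : Int)])]
    simp [List.map_map, Function.comp, incHead]
  · simp only [Nat.sub_zero, Nat.cast_zero]
    rw [gmiRec_prefix m (r + 1) ([] ++ [(0 : Int)])]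
    simp

lemma not_mem_rng_succ (a : Int) (m : Nat) : a ∉ rng (a + 1) m := by
  intro hmem
  simp only [rng, List.mem_map, List.mem_range] at hmem
  obtain ⟨j, hj, hje⟩ := hmem
  simp only [Int.ofNat_eq_natCast] at hje
  omega

lemma cwr_counts (m : Nat) : ∀ (a : Int) (r : Nat),
    (cwr r (rng a m)).map (fun c => (rng a m).map (fun i => (c.count i : Int))) = gmiRec m r [] := by
  induction m with
  | zero =>
    intro a r
    cases r with
    | zero => simp [cwr, rng, gmiRec]
    | succ r =>
      show (cwrStep (cwr r) (rng a 0)).map _ = _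
      simp [rng, cwrStep, gmiRec]
  | succ m ih =>
    intro a r
    induction r with
    | zero =>
      rw [gmiRec_zero]
      simp only [cwr, List.map_cons, List.map_nil]
      congr 1
      simp [rng, List.eq_replicate_iff]
    | succ r ihr =>
      rw [rng_succ] at ihr ⊢
      rw [show cwr (r + 1) (a :: rng (a + 1) m) =
            ((cwr r (a :: rng (a + 1) m)).map (fun c => a :: c)) ++ cwr (r + 1) (rng (a + 1) m) from rfl]
      rw [List.map_append, List.map_map]
      have h1 : ((fun c => (a :: rng (a + 1) m).map (fun i => (List.count i c : Int))) ∘ (fun c => a :: c))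
          = incHead ∘ (fun c => (a :: rng (a + 1) m).map (fun i => (List.count i c : Int))) := by
        funext c
        simp only [Function.comp, List.map_cons, List.count_cons_self, incHead]
        congr 1
        apply List.map_congr_left
        intro i hi
        have hne : a ≠ i := by
          simp only [rng, List.mem_map, List.mem_range] at hi
          obtain ⟨j, hj, rfl⟩ := hi
          simp only [Int.ofNat_eq_natCast]
          omega
        rw [List.count_cons]
        simp [hne]
      rw [h1, ← List.map_map, ihr]
      have h2 : (cwr (r + 1) (rng (a + 1) m)).map
            (fun c => (a :: rng (a + 1) m).map (fun i => (List.count i c : Int)))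
          = (gmiRec m (r + 1) []).map (fun t => (0 : Int) :: t) := by
        rw [List.map_congr_left (g := fun c => (0 : Int) ::
              (rng (a + 1) m).map (fun i => (List.count i c : Int))) ?_]
        · rw [← ih (a + 1) (r + 1), List.map_map]
          rfl
        · intro c hc
          simp only [List.map_cons]
          congr 1
          have hnc : a ∉ c := fun h => not_mem_rng_succ a m (mem_of_mem_cwr _ _ _ hc a h)
          simp [List.count_eq_zero_of_not_mem hnc]
      rw [h2, gmiRec_succ_succ]

lemma pyRange_toNat (n : Int) : PySem.List.pyRange 0 n 1 = rng 0 n.toNat := by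
  by_cases h : n ≤ 0
  · rw [show n.toNat = 0 by omega]
    simp [PySem.List.pyRange, rng]
    omega
  · rw [show n = (n.toNat : Int) by omega, PySem.List.pyRange_zero_natCast]
    simp [rng, Int.ofNat_eq_natCast]
    rw [show (max n 0).toNat = n.toNat from by omega]

-- ===== VERDICT (by name: the statement is the Claim_ definition above) =====
theorem generate_multi_indices_spec : Claim_equal_generate_multi_indices := by
  intro n d _
  unfold Spec_generate_multi_indices generate_multi_indices generate_multi_indices_alt
  rw [pyRange_toNat n]
  congr 1
  funext indices deg
  congr 1
  have := cwr_counts n.toNat 0 deg.toNat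
  simpa [rng] using this
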